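-- pv_equiv track=rewrite | github.com/jcchouz/leetcode | nowcoder_huaweijishi/HJ17坐标移动.py | check
-- ===== SOURCE A (Python) =====
-- def check(s: str):
--     if len(s) <= 8:
--         return False
--     check = [0] * 4
--     for c in s:
--         if c.isupper():
--             check[0] = 1
--         elif c.islower():
--             check[1] = 1
--         elif c.isdigit():
--             check[2] = 1
--         else:
--             check[3] = 1
--     if sum(check) < 3:
--         return False
--     for i in range(len(s) - 3):
--         if s[i : i + 3] in s[i + 3 :]:
--             return False
--     return True
-- ===== SOURCE B (Python) =====
-- def check(s: str):
--     if len(s) <= 8: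
--         return False
--     kinds = (any(c.isupper() for c in s)
--              + any(c.islower() for c in s)
--              + any(c.isdigit() for c in s)
--              + any(not (c.isupper() or c.islower() or c.isdigit()) for c in s))
--     if kinds < 3:
--         return False
--     first = {}
--     for j in range(len(s) - 2):
--         t = s[j:j + 3]
--         i = first.setdefault(t, j)
--         if j - i >= 3:
--             return False
--     return True
-- ===== Notes on version B (the rewrite author's own statement) =====
-- stated objective: alternative
-- what changed: A searches each 3-substring in the whole remaining suffix (quadratic worst case); B makes one pass recording each 3-gram's first index in a dict and fails when a 3-gram recurs at distance >= 3, and counts character classes as a sum of four any() scans instead of A's per-character flag-array loop.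
import Mathlib
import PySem

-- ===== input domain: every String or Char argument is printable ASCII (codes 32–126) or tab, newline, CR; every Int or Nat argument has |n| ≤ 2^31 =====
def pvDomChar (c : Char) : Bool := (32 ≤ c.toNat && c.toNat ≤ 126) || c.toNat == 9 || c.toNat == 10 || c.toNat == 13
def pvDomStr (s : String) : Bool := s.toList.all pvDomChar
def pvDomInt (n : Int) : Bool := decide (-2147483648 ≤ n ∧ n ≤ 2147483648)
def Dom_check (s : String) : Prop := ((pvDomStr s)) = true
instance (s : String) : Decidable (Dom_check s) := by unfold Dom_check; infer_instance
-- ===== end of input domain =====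

-- B replaces A's substring-in-suffix scan by one pass recording each 3-gram's first index
-- in a dict, and A's per-character flag-array loop by a sum of four any() scans;
-- objective: alternative algorithm.

-- ===== PORT A =====
-- the 'for c in s' loop setting the four class flags
def checkClassLoop (chk : List Int) : List Char → List Int
  | [] => chk
  | c :: rest =>
      if PySem.Chars.isupper c then checkClassLoop (chk.set 0 1) rest
      else if PySem.Chars.islower c then checkClassLoop (chk.set 1 1) rest
      else if PySem.Chars.isdigit c then checkClassLoop (chk.set 2 1) rest
      else checkClassLoop (chk.set 3 1) rest

-- the 'for i in range(len(s) - 3)' loop: 'if s[i:i+3] in s[i+3:]: return False'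
def checkRepLoop (cs : List Char) : List Int → Bool
  | [] => true
  | i :: rest =>
      if PySem.Chars.isIn (PySem.List.slice cs (some i) (some (i + 3)))
                          (PySem.List.slice cs (some (i + 3)) none)
      then false
      else checkRepLoop cs rest

def check (s : String) : Bool :=
  let cs := s.toList
  if (cs.length : Int) ≤ 8 then false
  else
    let chk := checkClassLoop [0, 0, 0, 0] cs
    if chk.sum < 3 then false
    else checkRepLoop cs (PySem.List.pyRange 0 ((cs.length : Int) - 3) 1)

-- ===== PORT B =====
-- Python's bool used as an int summand (any(...) + any(...) + …)
def boolInt (b : Bool) : Int := if b then 1 else 0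

-- the 'for j in range(len(s) - 2)' loop: first-index dict of 3-grams, fail on a gap ≥ 3
def checkAltRepLoop (cs : List Char) (first : PySem.Dict (List Char) Int) : List Int → Bool
  | [] => true
  | j :: rest =>
      let t := PySem.List.slice cs (some j) (some (j + 3))
      let i := first.getD t j
      let first' := first.setdefault t j
      if 3 ≤ j - i then false else checkAltRepLoop cs first' rest

def check_alt (s : String) : Bool :=
  let cs := s.toList
  if (cs.length : Int) ≤ 8 then false
  else
    let kinds := boolInt (cs.any PySem.Chars.isupper)
               + boolInt (cs.any PySem.Chars.islower)
               + boolInt (cs.any PySem.Chars.isdigit)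
               + boolInt (cs.any (fun c =>
                   !(PySem.Chars.isupper c || PySem.Chars.islower c || PySem.Chars.isdigit c)))
    if kinds < 3 then false
    else checkAltRepLoop cs PySem.Dict.empty (PySem.List.pyRange 0 ((cs.length : Int) - 2) 1)

-- ===== PRECONDITION & SPEC =====
def Spec_check (s : String) (out : Bool) : Prop := out = check_alt s
instance (s : String) (out : Bool) : Decidable (Spec_check s out) := by unfold Spec_check; infer_instance

-- ===== CLAIM (what is proved, stated in full; the proofs are below) =====
def Claim_equal_check : Prop := ∀ (s : String), Dom_check s → Spec_check s (check s)

-- ===== LEMMAS AND PROOFS =====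

-- the class tag A's elif chain assigns to a character
def cls (c : Char) : Int :=
  if PySem.Chars.isupper c then 0
  else if PySem.Chars.islower c then 1
  else if PySem.Chars.isdigit c then 2 else 3

-- the 3-gram starting at index j
def tri (cs : List Char) (j : Nat) : List Char := (cs.drop j).take 3

-- first index k < a with tri cs k = t
def firstOcc (cs : List Char) (t : List Char) : Nat → Option Nat
  | 0 => none
  | a + 1 =>
      match firstOcc cs t a with
      | some k => some k
      | none => if tri cs a = t then some a else none

theorem upper_lower_disj (c : Char) :
    ¬(PySem.Chars.isupper c = true ∧ PySem.Chars.islower c = true) := by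
  simp only [PySem.Chars.isupper, PySem.Chars.islower, decide_eq_true_eq, Bool.and_eq_true,
    not_and, Char.le_def, UInt32.le_iff_toNat_le, show ('A').val.toNat = 65 from rfl,
    show ('Z').val.toNat = 90 from rfl, show ('a').val.toNat = 97 from rfl,
    show ('z').val.toNat = 122 from rfl]
  intro h1 h2
  omega

theorem upper_digit_disj (c : Char) :
    ¬(PySem.Chars.isupper c = true ∧ PySem.Chars.isdigit c = true) := by
  simp only [PySem.Chars.isupper, PySem.Chars.isdigit, decide_eq_true_eq, Bool.and_eq_true,
    not_and, Char.le_def, UInt32.le_iff_toNat_le, show ('A').val.toNat = 65 from rfl,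
    show ('Z').val.toNat = 90 from rfl, show ('0').val.toNat = 48 from rfl,
    show ('9').val.toNat = 57 from rfl]
  intro h1 h2
  omega

theorem lower_digit_disj (c : Char) :
    ¬(PySem.Chars.islower c = true ∧ PySem.Chars.isdigit c = true) := by
  simp only [PySem.Chars.islower, PySem.Chars.isdigit, decide_eq_true_eq, Bool.and_eq_true,
    not_and, Char.le_def, UInt32.le_iff_toNat_le, show ('a').val.toNat = 97 from rfl,
    show ('z').val.toNat = 122 from rfl, show ('0').val.toNat = 48 from rfl,
    show ('9').val.toNat = 57 from rfl]
  intro h1 h2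
  omega

theorem cls_eq_zero_iff (c : Char) : cls c = 0 ↔ PySem.Chars.isupper c = true := by
  unfold cls; split_ifs with h1 h2 h3 <;> simp [h1]

theorem cls_eq_one_iff (c : Char) : cls c = 1 ↔ PySem.Chars.islower c = true := by
  unfold cls
  split_ifs with h1 h2 h3
  · have := upper_lower_disj c
    constructor
    · intro h; exact absurd h (by norm_num)
    · intro hl; exact absurd ⟨h1, hl⟩ this
  · simp [h2]
  · simp [h2]
  · simp [h2]

theorem cls_eq_two_iff (c : Char) : cls c = 2 ↔ PySem.Chars.isdigit c = true := by
  unfold cls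
  split_ifs with h1 h2 h3
  · constructor
    · intro h; exact absurd h (by norm_num)
    · intro hd; exact absurd ⟨h1, hd⟩ (upper_digit_disj c)
  · constructor
    · intro h; exact absurd h (by norm_num)
    · intro hd; exact absurd ⟨h2, hd⟩ (lower_digit_disj c)
  · simp [h3]
  · simp [h3]

theorem cls_eq_three_iff (c : Char) :
    cls c = 3 ↔
      (!(PySem.Chars.isupper c || PySem.Chars.islower c || PySem.Chars.isdigit c)) = true := by
  unfold cls; split_ifs with h1 h2 h3 <;> simp [*]

theorem checkClassLoop_spec (cs : List Char) (a b c d : Int) :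
    checkClassLoop [a, b, c, d] cs =
      [if 0 ∈ cs.map cls then 1 else a, if 1 ∈ cs.map cls then 1 else b,
       if 2 ∈ cs.map cls then 1 else c, if 3 ∈ cs.map cls then 1 else d] := by
  induction cs generalizing a b c d with
  | nil => simp [checkClassLoop]
  | cons x xs ih =>
      by_cases h1 : PySem.Chars.isupper x = true
      · have hcx : cls x = 0 := by simp [cls, h1]
        rw [show checkClassLoop [a, b, c, d] (x :: xs) = checkClassLoop [1, b, c, d] xs by
          simp [checkClassLoop, h1], ih]
        simp [hcx]
      · by_cases h2 : PySem.Chars.islower x = true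
        · have hcx : cls x = 1 := by simp [cls, h1, h2]
          rw [show checkClassLoop [a, b, c, d] (x :: xs) = checkClassLoop [a, 1, c, d] xs by
            simp [checkClassLoop, h1, h2], ih]
          simp [hcx]
        · by_cases h3 : PySem.Chars.isdigit x = true
          · have hcx : cls x = 2 := by simp [cls, h1, h2, h3]
            rw [show checkClassLoop [a, b, c, d] (x :: xs) = checkClassLoop [a, b, 1, d] xs by
              simp [checkClassLoop, h1, h2, h3], ih]
            simp [hcx]
          · have hcx : cls x = 3 := by simp [cls, h1, h2, h3]
            rw [show checkClassLoop [a, b, c, d] (x :: xs) = checkClassLoop [a, b, c, 1] xs by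
              simp [checkClassLoop, h1, h2, h3], ih]
            simp [hcx]

-- A's four flags sum to exactly B's sum of any() scans
theorem sum_eq_kinds (cs : List Char) :
    (checkClassLoop [0, 0, 0, 0] cs).sum =
      boolInt (cs.any PySem.Chars.isupper) + boolInt (cs.any PySem.Chars.islower)
      + boolInt (cs.any PySem.Chars.isdigit)
      + boolInt (cs.any (fun c =>
          !(PySem.Chars.isupper c || PySem.Chars.islower c || PySem.Chars.isdigit c))) := by
  rw [checkClassLoop_spec]
  have h0 : ((0 : Int) ∈ cs.map cls) ↔ cs.any PySem.Chars.isupper = true := by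
    simp only [List.mem_map, List.any_eq_true]
    exact ⟨fun ⟨c, hc, he⟩ => ⟨c, hc, (cls_eq_zero_iff c).mp he⟩,
           fun ⟨c, hc, hu⟩ => ⟨c, hc, ((cls_eq_zero_iff c).mpr hu)⟩⟩
  have h1 : ((1 : Int) ∈ cs.map cls) ↔ cs.any PySem.Chars.islower = true := by
    simp only [List.mem_map, List.any_eq_true]
    exact ⟨fun ⟨c, hc, he⟩ => ⟨c, hc, (cls_eq_one_iff c).mp he⟩,
           fun ⟨c, hc, hu⟩ => ⟨c, hc, ((cls_eq_one_iff c).mpr hu)⟩⟩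
  have h2 : ((2 : Int) ∈ cs.map cls) ↔ cs.any PySem.Chars.isdigit = true := by
    simp only [List.mem_map, List.any_eq_true]
    exact ⟨fun ⟨c, hc, he⟩ => ⟨c, hc, (cls_eq_two_iff c).mp he⟩,
           fun ⟨c, hc, hu⟩ => ⟨c, hc, ((cls_eq_two_iff c).mpr hu)⟩⟩
  have h3 : ((3 : Int) ∈ cs.map cls) ↔ cs.any (fun c =>
      !(PySem.Chars.isupper c || PySem.Chars.islower c || PySem.Chars.isdigit c)) = true := by
    simp only [List.mem_map, List.any_eq_true]
    exact ⟨fun ⟨c, hc, he⟩ => ⟨c, hc, (cls_eq_three_iff c).mp he⟩,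
           fun ⟨c, hc, hu⟩ => ⟨c, hc, ((cls_eq_three_iff c).mpr hu)⟩⟩
  have e0 : (if (0 : Int) ∈ cs.map cls then (1 : Int) else 0)
      = boolInt (cs.any PySem.Chars.isupper) := by
    unfold boolInt
    by_cases b : cs.any PySem.Chars.isupper = true
    · rw [if_pos (h0.mpr b), if_pos b]
    · rw [if_neg (fun h => b (h0.mp h)), if_neg b]
  have e1 : (if (1 : Int) ∈ cs.map cls then (1 : Int) else 0)
      = boolInt (cs.any PySem.Chars.islower) := by
    unfold boolInt
    by_cases b : cs.any PySem.Chars.islower = true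
    · rw [if_pos (h1.mpr b), if_pos b]
    · rw [if_neg (fun h => b (h1.mp h)), if_neg b]
  have e2 : (if (2 : Int) ∈ cs.map cls then (1 : Int) else 0)
      = boolInt (cs.any PySem.Chars.isdigit) := by
    unfold boolInt
    by_cases b : cs.any PySem.Chars.isdigit = true
    · rw [if_pos (h2.mpr b), if_pos b]
    · rw [if_neg (fun h => b (h2.mp h)), if_neg b]
  have e3 : (if (3 : Int) ∈ cs.map cls then (1 : Int) else 0)
      = boolInt (cs.any (fun c =>
          !(PySem.Chars.isupper c || PySem.Chars.islower c || PySem.Chars.isdigit c))) := by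
    unfold boolInt
    by_cases b : cs.any (fun c =>
        !(PySem.Chars.isupper c || PySem.Chars.islower c || PySem.Chars.isdigit c)) = true
    · rw [if_pos (h3.mpr b), if_pos b]
    · rw [if_neg (fun h => b (h3.mp h)), if_neg b]
  rw [List.sum_cons, List.sum_cons, List.sum_cons, List.sum_cons, List.sum_nil,
    e0, e1, e2, e3]
  ring

-- the pair property both repeat-scans decide (negated)
def HasRep (cs : List Char) : Prop :=
  ∃ i j : Nat, i + 3 ≤ j ∧ j + 3 ≤ cs.length ∧ tri cs i = tri cs j

theorem length_tri_of_le (cs : List Char) (i : Nat) (h : i + 3 ≤ cs.length) :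
    (tri cs i).length = 3 := by
  simp [tri]; omega

theorem tri_prefix_iff (cs : List Char) (i j : Nat) (hi : i + 3 ≤ cs.length) :
    tri cs i <+: cs.drop j ↔ (tri cs j = tri cs i ∧ j + 3 ≤ cs.length) := by
  constructor
  · intro h
    have htake := List.prefix_iff_eq_take.mp h
    rw [length_tri_of_le cs i hi] at htake
    have heq : tri cs j = tri cs i := by rw [tri, ← htake]
    refine ⟨heq, ?_⟩
    have hl := length_tri_of_le cs i hi
    rw [← heq] at hl
    simp [tri] at hl; omega
  · rintro ⟨heq, _⟩
    rw [List.prefix_iff_eq_take, length_tri_of_le cs i hi, ← heq, tri]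

theorem checkRepLoop_all (cs : List Char) (idxs : List Int) :
    checkRepLoop cs idxs = true ↔
      ∀ i ∈ idxs, PySem.Chars.isIn (PySem.List.slice cs (some i) (some (i + 3)))
        (PySem.List.slice cs (some (i + 3)) none) = false := by
  induction idxs with
  | nil => simp [checkRepLoop]
  | cons x xs ih =>
      simp only [checkRepLoop, List.mem_cons]
      split_ifs with h
      · constructor
        · intro h'; exact absurd h' (by simp)
        · intro hall
          exact absurd (hall x (Or.inl rfl)) (by simp [h])
      · rw [ih]
        constructor
        · rintro hall i (rfl | hi)
          · simpa using h
          · exact hall i hi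
        · intro hall i hi; exact hall i (Or.inr hi)

theorem slice_tri (cs : List Char) (i : Nat) :
    PySem.List.slice cs (some (i : Int)) (some ((i : Int) + 3)) = tri cs i := by
  have := PySem.List.slice_natCast_add cs i 3
  norm_num at this
  simpa [tri] using this

theorem checkRepLoop_iff (cs : List Char) :
    checkRepLoop cs (PySem.List.pyRange 0 ((cs.length : Int) - 3) 1) = true ↔ ¬ HasRep cs := by
  rw [checkRepLoop_all]
  constructor
  · rintro hall ⟨i, j, hij, hjn, heq⟩
    have hi3 : i + 3 ≤ cs.length := by omega
    have hmem : (i : Int) ∈ PySem.List.pyRange 0 ((cs.length : Int) - 3) 1 := by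
      rw [PySem.List.mem_pyRange_one]
      constructor
      · positivity
      · omega
    have hfalse := hall (i : Int) hmem
    rw [show ((i : Int) + 3) = ((i + 3 : Nat) : Int) by push_cast; ring] at hfalse
    rw [PySem.List.slice_from_natCast] at hfalse
    rw [show PySem.List.slice cs (some (i : Int)) (some ((i + 3 : Nat) : Int)) = tri cs i by
      rw [← slice_tri cs i]; norm_num] at hfalse
    have hex : ∃ k, tri cs i <+: (cs.drop (i + 3)).drop k := by
      refine ⟨j - (i + 3), ?_⟩
      rw [List.drop_drop, show i + 3 + (j - (i + 3)) = j by omega]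
      exact (tri_prefix_iff cs i j hi3).mpr ⟨heq.symm, hjn⟩
    rw [(PySem.Chars.exists_prefix_drop_iff_isIn _ _).mp hex] at hfalse
    exact absurd hfalse (by simp)
  · intro hnr x hmem
    rw [PySem.List.mem_pyRange_one] at hmem
    obtain ⟨hx0, hxn⟩ := hmem
    obtain ⟨i, rfl⟩ : ∃ i : Nat, x = (i : Int) := ⟨x.toNat, by omega⟩
    have hi3 : i + 3 ≤ cs.length := by omega
    rw [show ((i : Int) + 3) = ((i + 3 : Nat) : Int) by push_cast; ring]
    rw [PySem.List.slice_from_natCast]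
    rw [show PySem.List.slice cs (some (i : Int)) (some ((i + 3 : Nat) : Int)) = tri cs i by
      rw [← slice_tri cs i]; norm_num]
    by_contra hne
    have htrue : PySem.Chars.isIn (tri cs i) (cs.drop (i + 3)) = true := by
      cases h : PySem.Chars.isIn (tri cs i) (cs.drop (i + 3)) with
      | false => exact absurd h hne
      | true => rfl
    obtain ⟨k, hk⟩ := (PySem.Chars.exists_prefix_drop_iff_isIn _ _).mpr htrue
    rw [List.drop_drop] at hk
    obtain ⟨heq, hjn⟩ := (tri_prefix_iff cs i (i + 3 + k) hi3).mp hk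
    exact hnr ⟨i, i + 3 + k, by omega, hjn, heq.symm⟩

theorem firstOcc_eq_none_iff (cs : List Char) (t : List Char) (a : Nat) :
    firstOcc cs t a = none ↔ ∀ k < a, tri cs k ≠ t := by
  induction a with
  | zero => simp [firstOcc]
  | succ a ih =>
      simp only [firstOcc]
      cases h : firstOcc cs t a with
      | some k =>
          simp only []
          constructor
          · intro h'; exact absurd h' (by simp)
          · intro hall
            exfalso
            have := ih.mpr (fun k hk => hall k (by omega))
            rw [this] at h; exact absurd h (by simp)
      | none =>
          simp only []
          split_ifs with he
          · constructor
            · intro h'; exact absurd h' (by simp)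
            · intro hall; exact absurd he (hall a (by omega))
          · constructor
            · intro _ k hk
              rcases Nat.lt_succ_iff_lt_or_eq.mp hk with hk' | rfl
              · exact (ih.mp h) k hk'
              · exact he
            · intro _; rfl

theorem firstOcc_spec (cs : List Char) (t : List Char) (a k : Nat)
    (h : firstOcc cs t a = some k) :
    k < a ∧ tri cs k = t ∧ ∀ i < k, tri cs i ≠ t := by
  induction a with
  | zero => simp [firstOcc] at h
  | succ a ih =>
      simp only [firstOcc] at h
      cases h' : firstOcc cs t a with
      | some k' =>
          rw [h'] at h
          obtain rfl : k' = k := by simpa using h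
          obtain ⟨h1, h2, h3⟩ := ih h'
          exact ⟨by omega, h2, h3⟩
      | none =>
          rw [h'] at h
          split_ifs at h with he
          · obtain rfl : a = k := by simpa using h
            exact ⟨by omega, he, fun i hi => (firstOcc_eq_none_iff cs t a).mp h' i hi⟩

theorem firstOcc_succ_of_ne (cs : List Char) (t : List Char) (a : Nat)
    (h : tri cs a ≠ t) : firstOcc cs t (a + 1) = firstOcc cs t a := by
  simp only [firstOcc]
  cases h' : firstOcc cs t a <;> simp [h]

theorem firstOcc_succ_of_some (cs : List Char) (t : List Char) (a k : Nat)
    (h : firstOcc cs t a = some k) : firstOcc cs t (a + 1) = some k := by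
  simp only [firstOcc, h]

theorem firstOcc_succ_self (cs : List Char) (a : Nat)
    (h : firstOcc cs (tri cs a) a = none) :
    firstOcc cs (tri cs a) (a + 1) = some a := by
  simp [firstOcc, h]

theorem checkAltRepLoop_spec (cs : List Char) (m : Nat) :
    ∀ (fuel : Nat) (a : Nat) (d : PySem.Dict (List Char) Int), m - a ≤ fuel →
      (∀ t, d.get? t = (firstOcc cs t a).map (fun k => (k : Int))) →
      (checkAltRepLoop cs d (PySem.List.pyRange (a : Int) (m : Int) 1) = true ↔
        ∀ j : Nat, a ≤ j → j < m → ∀ i : Nat, i + 3 ≤ j → tri cs i ≠ tri cs j) := by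
  intro fuel
  induction fuel with
  | zero =>
      intro a d hf _
      have ham : m ≤ a := by omega
      rw [PySem.List.pyRange_one_eq_nil (by exact_mod_cast ham)]
      simp only [checkAltRepLoop, true_iff]
      intro j hj hjm; omega
  | succ fuel ih =>
      intro a d hf hinv
      by_cases ham : m ≤ a
      · rw [PySem.List.pyRange_one_eq_nil (by exact_mod_cast ham)]
        simp only [checkAltRepLoop, true_iff]
        intro j hj hjm; omega
      · have ham' : a < m := by omega
        rw [PySem.List.pyRange_one_cons (by exact_mod_cast ham')]
        rw [show ((a : Int) + 1) = ((a + 1 : Nat) : Int) by push_cast; ring]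
        simp only [checkAltRepLoop]
        rw [show PySem.List.slice cs (some (a : Int)) (some ((a : Int) + 3)) = tri cs a from
          slice_tri cs a]
        have hget := hinv (tri cs a)
        cases hocc : firstOcc cs (tri cs a) a with
        | none =>
            rw [hocc] at hget
            simp at hget
            have hgd : PySem.Dict.getD d (tri cs a) (a : Int) = (a : Int) := by
              simp [PySem.Dict.getD, hget]
            rw [hgd]
            rw [if_neg (by omega)]
            have hcont : d.contains (tri cs a) = false :=
              (PySem.Dict.get?_eq_none_iff_contains d _).mp hget
            rw [PySem.Dict.setdefault_of_not_contains d _ hcont]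
            rw [ih (a + 1) (d.insert (tri cs a) (a : Int)) (by omega) ?_]
            · constructor
              · intro hall j hj hjm i hij
                rcases Nat.lt_or_ge a j with haj | haj
                · exact hall j (by omega) hjm i hij
                · rw [show j = a by omega]
                  exact (firstOcc_eq_none_iff cs (tri cs a) a).mp hocc i (by omega)
              · intro hall j hj hjm i hij
                exact hall j (by omega) hjm i hij
            · intro t'
              by_cases ht : t' = tri cs a
              · subst ht
                rw [PySem.Dict.get?_insert_self, firstOcc_succ_self cs a hocc]
                rfl
              · rw [PySem.Dict.get?_insert_of_ne d _ ht,
                    firstOcc_succ_of_ne cs t' a (fun he => ht he.symm)]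
                exact hinv t'
        | some k =>
            rw [hocc] at hget
            have hget' : d.get? (tri cs a) = some ((k : Nat) : Int) := hget
            have hgd : PySem.Dict.getD d (tri cs a) (a : Int) = (k : Int) := by
              simp [PySem.Dict.getD, hget']
            rw [hgd]
            obtain ⟨hka, htk, hmin⟩ := firstOcc_spec cs (tri cs a) a k hocc
            by_cases hgap : k + 3 ≤ a
            · rw [if_pos (by omega)]
              constructor
              · intro h; exact absurd h (by simp)
              · intro hall
                exact absurd htk (hall a (by omega) ham' k hgap)
            · rw [if_neg (by omega)]
              have hcont : d.contains (tri cs a) = true := by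
                cases hc : d.contains (tri cs a) with
                | true => rfl
                | false =>
                    rw [(PySem.Dict.get?_eq_none_iff_contains d _).mpr hc] at hget'
                    exact absurd hget' (by simp)
              rw [PySem.Dict.setdefault_of_contains d _ hcont]
              rw [ih (a + 1) d (by omega) ?_]
              · constructor
                · intro hall j hj hjm i hij
                  rcases Nat.lt_or_ge a j with haj | haj
                  · exact hall j (by omega) hjm i hij
                  · obtain rfl : j = a := by omega
                    intro heq
                    have hik : k ≤ i := by
                      by_contra hik
                      exact hmin i (by omega) heq
                    omega
                · intro hall j hj hjm i hij
                  exact hall j (by omega) hjm i hij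
              · intro t'
                by_cases ht : t' = tri cs a
                · subst ht
                  rw [firstOcc_succ_of_some cs _ a k hocc, hget']
                  rfl
                · rw [firstOcc_succ_of_ne cs t' a (fun he => ht he.symm)]
                  exact hinv t'

theorem checkAltRepLoop_iff (cs : List Char) (h9 : 9 ≤ cs.length) :
    checkAltRepLoop cs PySem.Dict.empty (PySem.List.pyRange 0 ((cs.length : Int) - 2) 1) = true ↔
      ¬ HasRep cs := by
  have hcast : ((cs.length : Int) - 2) = ((cs.length - 2 : Nat) : Int) := by omega
  rw [hcast, show (0 : Int) = ((0 : Nat) : Int) from rfl]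
  rw [checkAltRepLoop_spec cs (cs.length - 2) (cs.length - 2) 0 PySem.Dict.empty (by omega)
    (fun t => by simp [PySem.Dict.get?_empty, firstOcc])]
  constructor
  · rintro hall ⟨i, j, hij, hjn, heq⟩
    exact hall j (by omega) (by omega) i hij heq
  · intro hnr j _ hjm i hij heq
    exact hnr ⟨i, j, hij, by omega, heq⟩

-- ===== VERDICT (by name: the statement is the Claim_ definition above) =====
theorem check_spec : Claim_equal_check := by
  intro s _
  unfold Spec_check check check_alt
  simp only []
  by_cases h8 : ((s.toList.length : Int) ≤ 8)
  · rw [if_pos h8, if_pos h8]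
  · rw [if_neg h8, if_neg h8]
    have h9 : 9 ≤ s.toList.length := by omega
    rw [← sum_eq_kinds]
    by_cases hcls : (checkClassLoop [0, 0, 0, 0] s.toList).sum < 3
    · rw [if_pos hcls, if_pos hcls]
    · rw [if_neg hcls, if_neg hcls]
      rw [Bool.eq_iff_iff, checkRepLoop_iff, checkAltRepLoop_iff s.toList h9]
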